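-- pv_equiv track=rewrite | github.com/raeul0304/upstageCodingTest | programmers/level3/공 이동 시뮬레이션/[프로그래머스] 공 이동 시뮬레이션.py | solution
-- ===== SOURCE A (Python) =====
-- def solution(n, m, x, y, queries):
--     answer = 0
--     x_min, x_max, y_min, y_max = x, x, y, y
--
--     for i in range(len(queries)-1, -1, -1):
--         way, dx = queries[i]
--
--         if way == 0: # 실제: 좌측 이동 / 거꾸로: 우측 이동
--             y_max += dx
--             if y_max > m-1: # 벽에 부딪힌 경우
--                 y_max = m-1 # 최대치로 재설정
--             if y_min != 0:
--                 y_min += dx # 갈 수 있는 지역 축소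
--
--         elif way == 1: # 실제: 우측 이동 / 거꾸로: 좌측 이동
--             y_min -= dx
--             if y_min < 0: # 벽에 부딪힌 경우
--                 y_min = 0 # 최소치로 재설정
--             if y_max != m-1:
--                 y_max -= dx # 갈 수 있는 지역 축소
--
--         elif way == 2: #실제: 위로 이동 / 거꾸로: 아래로 이동
--             x_max += dx
--             if x_max > n-1: # 벽에 부딪힌 경우
--                 x_max = n-1 # 최대치로 재설정
--             if x_min != 0:
--                 x_min += dx # 갈 수 있는 지역 축소
--
--         else: #실제: 아래 이동 / 거꾸로: 위에 이동
--             x_min -= dx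
--             if x_min < 0:  # 벽에 부딪힌 경우
--                 x_min = 0 # 최소치로 재설정
--             if x_max != n-1:
--                 x_max -= dx # 갈 수 있는 지역 축소
--
--         if y_min > m-1 or y_max < 0 or x_min > n-1 or x_max < 0 :
--             return 0
--         else:
--             answer = (y_max - y_min + 1) * (x_max - x_min +1)
--
--     return answer
-- ===== SOURCE B (Python) =====
-- def _axis(size, pos, steps):
--     # Reverse-evolve one axis's interval [lo, hi] of feasible starts.
--     # steps has one entry per time step: None when the move is on the other
--     # axis, else (towards_max, distance).  The feasible set must meet the
--     # board after every time step; otherwise there is no valid start (None).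
--     lo = hi = pos
--     for step in steps:
--         if step is not None:
--             towards_max, d = step
--             if towards_max:
--                 hi = min(hi + d, size - 1)
--                 if lo != 0:
--                     lo += d
--             else:
--                 lo = max(lo - d, 0)
--                 if hi != size - 1:
--                     hi -= d
--         if lo > size - 1 or hi < 0:
--             return None
--     return lo, hi
--
--
-- def solution(n, m, x, y, queries):
--     rev = queries[::-1]
--     ys = _axis(m, y, [(w == 0, d) if w in (0, 1) else None for w, d in rev])
--     xs = _axis(n, x, [None if w in (0, 1) else (w == 2, d) for w, d in rev])
--     if ys is None or xs is None:
--         return 0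
--     (ylo, yhi), (xlo, xhi) = ys, xs
--     return (yhi - ylo + 1) * (xhi - xlo + 1)
-- ===== Notes on version B (the rewrite author's own statement) =====
-- stated objective: alternative
-- what changed: A's single fused reverse loop over a 4-variable (x,y) interval state is replaced by one generic single-axis interval pass run once per axis over the reversed timeline (other-axis moves appear as no-op time steps), with the per-time-step feasibility check kept inside each pass.
-- intended difference: On empty query lists A returns 0 (its answer accumulator is never updated) while B returns 1, the number of starting cells (the target itself) when no moves occur, which is the intended count. — e.g. on solution(1, 1, 0, 0, []): A returns 0, B returns 1
import Mathlib
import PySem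

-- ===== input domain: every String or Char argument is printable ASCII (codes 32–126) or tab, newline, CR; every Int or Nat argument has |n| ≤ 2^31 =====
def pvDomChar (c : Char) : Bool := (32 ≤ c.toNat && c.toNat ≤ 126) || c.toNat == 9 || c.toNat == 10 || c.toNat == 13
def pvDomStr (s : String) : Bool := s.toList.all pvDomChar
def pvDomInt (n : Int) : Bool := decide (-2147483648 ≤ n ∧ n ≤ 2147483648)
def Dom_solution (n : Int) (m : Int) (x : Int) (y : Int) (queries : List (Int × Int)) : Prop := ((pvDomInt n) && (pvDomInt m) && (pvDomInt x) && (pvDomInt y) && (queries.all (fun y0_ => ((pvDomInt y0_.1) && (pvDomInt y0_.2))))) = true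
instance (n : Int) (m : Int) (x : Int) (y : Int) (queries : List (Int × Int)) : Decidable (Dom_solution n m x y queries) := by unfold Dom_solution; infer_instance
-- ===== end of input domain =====

-- B: one generic single-axis interval pass, run once per axis over the
-- reversed timeline, instead of A's fused 4-variable reverse loop.

-- ===== PORT A =====
-- A iterates i = len-1 .. 0 over queries, i.e. over queries.reverse; the
-- early `return 0` is the 0-branch, `answer` is the accumulator.
def solGo (n : Int) (m : Int) : List (Int × Int) → Int → Int → Int → Int → Int → Int
  | [], _, _, _, _, answer => answer
  | (way, dx) :: rest, xmin, xmax, ymin, ymax, _ =>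
    let s : Int × Int × Int × Int :=
      if way = 0 then
        (xmin, xmax, (if ymin ≠ 0 then ymin + dx else ymin),
          (if ymax + dx > m - 1 then m - 1 else ymax + dx))
      else if way = 1 then
        (xmin, xmax, (if ymin - dx < 0 then 0 else ymin - dx),
          (if ymax ≠ m - 1 then ymax - dx else ymax))
      else if way = 2 then
        ((if xmin ≠ 0 then xmin + dx else xmin),
          (if xmax + dx > n - 1 then n - 1 else xmax + dx), ymin, ymax)
      else
        ((if xmin - dx < 0 then 0 else xmin - dx),
          (if xmax ≠ n - 1 then xmax - dx else xmax), ymin, ymax)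
    if s.2.2.1 > m - 1 ∨ s.2.2.2 < 0 ∨ s.1 > n - 1 ∨ s.2.1 < 0 then 0
    else solGo n m rest s.1 s.2.1 s.2.2.1 s.2.2.2
      ((s.2.2.2 - s.2.2.1 + 1) * (s.2.1 - s.1 + 1))

def solution (n : Int) (m : Int) (x : Int) (y : Int) (queries : List (Int × Int)) : Int :=
  solGo n m queries.reverse x x y y 0

-- ===== PORT B =====
-- _axis: one entry per time step (`none` = other-axis move); the interval
-- must meet the board after every time step, else no valid start exists.
def axisGo (size : Int) : List (Option (Bool × Int)) → Int → Int → Option (Int × Int)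
  | [], lo, hi => some (lo, hi)
  | step :: rest, lo, hi =>
    let s : Int × Int :=
      match step with
      | none => (lo, hi)
      | some (up, d) =>
        if up then ((if lo ≠ 0 then lo + d else lo), min (hi + d) (size - 1))
        else (max (lo - d) 0, (if hi ≠ size - 1 then hi - d else hi))
    if s.1 > size - 1 ∨ s.2 < 0 then none else axisGo size rest s.1 s.2

def solution_alt (n : Int) (m : Int) (x : Int) (y : Int) (queries : List (Int × Int)) : Int :=
  let rev := queries.reverse
  let ys := axisGo m (rev.map (fun q => if q.1 == 0 || q.1 == 1 then some (q.1 == 0, q.2) else none)) y y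
  let xs := axisGo n (rev.map (fun q => if q.1 == 0 || q.1 == 1 then none else some (q.1 == 2, q.2))) x x
  match ys, xs with
  | some (ylo, yhi), some (xlo, xhi) => (yhi - ylo + 1) * (xhi - xlo + 1)
  | _, _ => 0

-- ===== PRECONDITION & SPEC =====
-- On empty query lists A returns 0 (its answer accumulator is never updated)
-- while B returns 1, the number of starting cells (the target itself) when no
-- moves occur, which is the intended count.
def D_solution (n : Int) (m : Int) (x : Int) (y : Int) (queries : List (Int × Int)) : Prop := queries = []
instance (n : Int) (m : Int) (x : Int) (y : Int) (queries : List (Int × Int)) : Decidable (D_solution n m x y queries) := by unfold D_solution; infer_instance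

def Spec_solution (n : Int) (m : Int) (x : Int) (y : Int) (queries : List (Int × Int)) (out : Int) : Prop := ¬ D_solution n m x y queries → out = solution_alt n m x y queries
instance (n : Int) (m : Int) (x : Int) (y : Int) (queries : List (Int × Int)) (out : Int) : Decidable (Spec_solution n m x y queries out) := by unfold Spec_solution; infer_instance

def pvDiffWitness_solution : Int × Int × Int × Int × (List (Int × Int)) := (1, 1, 0, 0, [])
def pvDiffWitnessOut_solution : Int × Int := (0, 1)

-- ===== CLAIM (what is proved, stated in full; the proofs are below) =====
def Claim_unchanged_solution : Prop := ∀ (n : Int) (m : Int) (x : Int) (y : Int) (queries : List (Int × Int)), Dom_solution n m x y queries → Spec_solution n m x y queries (solution n m x y queries)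
def Claim_changed_solution : Prop := Dom_solution (pvDiffWitness_solution.1) (pvDiffWitness_solution.2.1) (pvDiffWitness_solution.2.2.1) (pvDiffWitness_solution.2.2.2.1) (pvDiffWitness_solution.2.2.2.2) ∧ D_solution (pvDiffWitness_solution.1) (pvDiffWitness_solution.2.1) (pvDiffWitness_solution.2.2.1) (pvDiffWitness_solution.2.2.2.1) (pvDiffWitness_solution.2.2.2.2) ∧ solution (pvDiffWitness_solution.1) (pvDiffWitness_solution.2.1) (pvDiffWitness_solution.2.2.1) (pvDiffWitness_solution.2.2.2.1) (pvDiffWitness_solution.2.2.2.2) = pvDiffWitnessOut_solution.1 ∧ solution_alt (pvDiffWitness_solution.1) (pvDiffWitness_solution.2.1) (pvDiffWitness_solution.2.2.1) (pvDiffWitness_solution.2.2.2.1) (pvDiffWitness_solution.2.2.2.2) = pvDiffWitnessOut_solution.2 ∧ pvDiffWitnessOut_solution.1 ≠ pvDiffWitnessOut_solution.2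
def Claim_exact_solution : Prop := ∀ (n : Int) (m : Int) (x : Int) (y : Int) (queries : List (Int × Int)), Dom_solution n m x y queries → D_solution n m x y queries → solution n m x y queries ≠ solution_alt n m x y queries

-- ===== LEMMAS AND PROOFS =====

-- the per-axis time-step lists B feeds to its helper
def yS (L : List (Int × Int)) : List (Option (Bool × Int)) :=
  L.map (fun q => if q.1 == 0 || q.1 == 1 then some (q.1 == 0, q.2) else none)
def xS (L : List (Int × Int)) : List (Option (Bool × Int)) :=
  L.map (fun q => if q.1 == 0 || q.1 == 1 then none else some (q.1 == 2, q.2))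

-- combined result of the two axis passes
def comb2 (n m : Int) (L : List (Int × Int)) (ylo yhi xlo xhi : Int) : Int :=
  match axisGo m (yS L) ylo yhi, axisGo n (xS L) xlo xhi with
  | some (a, b), some (c, d) => (b - a + 1) * (d - c + 1)
  | _, _ => 0

theorem comb2_nil (n m ylo yhi xlo xhi : Int) :
    comb2 n m [] ylo yhi xlo xhi = (yhi - ylo + 1) * (xhi - xlo + 1) := by
  simp [comb2, yS, xS, axisGo]

theorem match_collapse (n m : Int) (rest : List (Int × Int)) (ylo yhi xlo xhi : Int) :
    (match rest with
     | [] => (yhi - ylo + 1) * (xhi - xlo + 1)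
     | _ :: _ => comb2 n m rest ylo yhi xlo xhi) = comb2 n m rest ylo yhi xlo xhi := by
  cases rest with
  | nil => simp [comb2_nil]
  | cons a t => rfl

theorem solGo_eq (n m : Int) : ∀ (L : List (Int × Int)) (xlo xhi ylo yhi ans : Int),
    solGo n m L xlo xhi ylo yhi ans =
      match L with
      | [] => ans
      | _ :: _ => comb2 n m L ylo yhi xlo xhi := by
  intro L
  induction L with
  | nil => intro _ _ _ _ _; rfl
  | cons hd rest ih =>
    obtain ⟨w, d⟩ := hd
    intro xlo xhi ylo yhi ans
    by_cases h0 : w = 0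
    · subst h0
      have hys : yS ((0, d) :: rest) = some (true, d) :: yS rest := by simp [yS]
      have hxs : xS ((0, d) :: rest) = none :: xS rest := by simp [xS]
      simp only [solGo, comb2, hys, hxs, axisGo]
      norm_num
      have hm : (if m ≤ yhi + d then m - 1 else yhi + d) = min (yhi + d) (m - 1) := by omega
      rw [hm]
      by_cases hcy : (m ≤ if ylo = 0 then ylo else ylo + d) ∨ min (yhi + d) (m - 1) < 0
      · have cA : (m ≤ if ylo = 0 then ylo else ylo + d) ∨ min (yhi + d) (m - 1) < 0 ∨ n ≤ xlo ∨ xhi < 0 := by omega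
        have cB : (m ≤ if ylo = 0 then ylo else ylo + d) ∨ yhi + d < 0 ∨ m < 1 := by omega
        rw [if_pos cA, if_pos cB]
      · have cB : ¬((m ≤ if ylo = 0 then ylo else ylo + d) ∨ yhi + d < 0 ∨ m < 1) := by omega
        rw [if_neg cB]
        by_cases hcx : n ≤ xlo ∨ xhi < 0
        · have cA : (m ≤ if ylo = 0 then ylo else ylo + d) ∨ min (yhi + d) (m - 1) < 0 ∨ n ≤ xlo ∨ xhi < 0 := by omega
          rw [if_pos cA, if_pos hcx]
          cases hY : axisGo m (yS rest) (if ylo = 0 then ylo else ylo + d) (min (yhi + d) (m - 1)) with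
          | none => rfl
          | some p => obtain ⟨a, b⟩ := p; rfl
        · have cA : ¬((m ≤ if ylo = 0 then ylo else ylo + d) ∨ min (yhi + d) (m - 1) < 0 ∨ n ≤ xlo ∨ xhi < 0) := by omega
          rw [if_neg cA, if_neg hcx, ih]
          exact match_collapse n m rest _ _ _ _
    by_cases h1 : w = 1
    · subst h1
      have hys : yS ((1, d) :: rest) = some (false, d) :: yS rest := by simp [yS]
      have hxs : xS ((1, d) :: rest) = none :: xS rest := by simp [xS]
      simp only [solGo, comb2, hys, hxs, axisGo]
      norm_num
      have hm : (if ylo < d then 0 else ylo - d) = max (ylo - d) 0 := by omega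
      rw [hm]
      by_cases hcy : (m ≤ max (ylo - d) 0) ∨ (if yhi = m - 1 then yhi else yhi - d) < 0
      · have cA : (m ≤ max (ylo - d) 0) ∨ (if yhi = m - 1 then yhi else yhi - d) < 0 ∨ n ≤ xlo ∨ xhi < 0 := by omega
        have cB : (m ≤ ylo - d ∨ m < 1) ∨ (if yhi = m - 1 then yhi else yhi - d) < 0 := by omega
        rw [if_pos cA, if_pos cB]
      · have cB : ¬((m ≤ ylo - d ∨ m < 1) ∨ (if yhi = m - 1 then yhi else yhi - d) < 0) := by omega
        rw [if_neg cB]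
        by_cases hcx : n ≤ xlo ∨ xhi < 0
        · have cA : (m ≤ max (ylo - d) 0) ∨ (if yhi = m - 1 then yhi else yhi - d) < 0 ∨ n ≤ xlo ∨ xhi < 0 := by omega
          rw [if_pos cA, if_pos hcx]
          cases hY : axisGo m (yS rest) (max (ylo - d) 0) (if yhi = m - 1 then yhi else yhi - d) with
          | none => rfl
          | some p => obtain ⟨a, b⟩ := p; rfl
        · have cA : ¬((m ≤ max (ylo - d) 0) ∨ (if yhi = m - 1 then yhi else yhi - d) < 0 ∨ n ≤ xlo ∨ xhi < 0) := by omega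
          rw [if_neg cA, if_neg hcx, ih]
          exact match_collapse n m rest _ _ _ _
    by_cases h2 : w = 2
    · subst h2
      have hys : yS ((2, d) :: rest) = none :: yS rest := by simp [yS]
      have hxs : xS ((2, d) :: rest) = some (true, d) :: xS rest := by simp [xS]
      simp only [solGo, comb2, hys, hxs, axisGo]
      norm_num
      have hm : (if n ≤ xhi + d then n - 1 else xhi + d) = min (xhi + d) (n - 1) := by omega
      rw [hm]
      by_cases hcx : (n ≤ if xlo = 0 then xlo else xlo + d) ∨ min (xhi + d) (n - 1) < 0
      · have cA : m ≤ ylo ∨ yhi < 0 ∨ (n ≤ if xlo = 0 then xlo else xlo + d) ∨ min (xhi + d) (n - 1) < 0 := by omega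
        have cB : (n ≤ if xlo = 0 then xlo else xlo + d) ∨ xhi + d < 0 ∨ n < 1 := by omega
        rw [if_pos cA, if_pos cB]
        cases hY : (if m ≤ ylo ∨ yhi < 0 then none else axisGo m (yS rest) ylo yhi) with
        | none => rfl
        | some p => obtain ⟨a, b⟩ := p; rfl
      · have cB : ¬((n ≤ if xlo = 0 then xlo else xlo + d) ∨ xhi + d < 0 ∨ n < 1) := by omega
        rw [if_neg cB]
        by_cases hcy : m ≤ ylo ∨ yhi < 0
        · have cA : m ≤ ylo ∨ yhi < 0 ∨ (n ≤ if xlo = 0 then xlo else xlo + d) ∨ min (xhi + d) (n - 1) < 0 := by omega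
          rw [if_pos cA, if_pos hcy]
        · have cA : ¬(m ≤ ylo ∨ yhi < 0 ∨ (n ≤ if xlo = 0 then xlo else xlo + d) ∨ min (xhi + d) (n - 1) < 0) := by omega
          rw [if_neg cA, if_neg hcy, ih]
          exact match_collapse n m rest _ _ _ _
    · have hys : yS ((w, d) :: rest) = none :: yS rest := by simp [yS, h0, h1]
      have hxs : xS ((w, d) :: rest) = some (false, d) :: xS rest := by simp [xS, h0, h1, h2]
      simp only [solGo, comb2, hys, hxs, axisGo, h0, h1, h2]
      norm_num [h0, h1, h2]
      have hm : (if xlo < d then 0 else xlo - d) = max (xlo - d) 0 := by omega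
      rw [hm]
      by_cases hcx : (n ≤ max (xlo - d) 0) ∨ (if xhi = n - 1 then xhi else xhi - d) < 0
      · have cA : m ≤ ylo ∨ yhi < 0 ∨ (n ≤ max (xlo - d) 0) ∨ (if xhi = n - 1 then xhi else xhi - d) < 0 := by omega
        have cB : (n ≤ xlo - d ∨ n < 1) ∨ (if xhi = n - 1 then xhi else xhi - d) < 0 := by omega
        rw [if_pos cA, if_pos cB]
        cases hY : (if m ≤ ylo ∨ yhi < 0 then none else axisGo m (yS rest) ylo yhi) with
        | none => rfl
        | some p => obtain ⟨a, b⟩ := p; rfl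
      · have cB : ¬((n ≤ xlo - d ∨ n < 1) ∨ (if xhi = n - 1 then xhi else xhi - d) < 0) := by omega
        rw [if_neg cB]
        by_cases hcy : m ≤ ylo ∨ yhi < 0
        · have cA : m ≤ ylo ∨ yhi < 0 ∨ (n ≤ max (xlo - d) 0) ∨ (if xhi = n - 1 then xhi else xhi - d) < 0 := by omega
          rw [if_pos cA, if_pos hcy]
        · have cA : ¬(m ≤ ylo ∨ yhi < 0 ∨ (n ≤ max (xlo - d) 0) ∨ (if xhi = n - 1 then xhi else xhi - d) < 0) := by omega
          rw [if_neg cA, if_neg hcy, ih]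
          exact match_collapse n m rest _ _ _ _

-- ===== VERDICT (by name: the statement is the Claim_ definition above) =====
theorem solution_spec : Claim_unchanged_solution := by
  intro n m x y queries _ hD
  show solution n m x y queries = solution_alt n m x y queries
  have hne : queries.reverse ≠ [] := by
    simp only [ne_eq, List.reverse_eq_nil_iff]
    exact fun h => hD h
  unfold solution solution_alt
  dsimp only
  rw [solGo_eq]
  cases hrev : queries.reverse with
  | nil => exact absurd hrev hne
  | cons hd tl =>
    show comb2 n m (hd :: tl) y y x x = _
    unfold comb2 yS xS
    rfl

theorem solution_changed : Claim_changed_solution := by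
  unfold Claim_changed_solution; decide

theorem solution_tight : Claim_exact_solution := by
  intro n m x y queries _ hD
  subst hD
  show (0 : Int) ≠ _
  unfold solution_alt
  dsimp only
  simp only [List.reverse_nil, List.map_nil, axisGo]
  have : (y - y + 1) * (x - x + 1) = 1 := by ring
  omega
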